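-- pv_equiv track=rewrite | github.com/rahilagrawal-university-assignments/survey_system_website | functions.py | data_for_view
-- ===== SOURCE A (Python) =====
-- def data_for_view(answers):
--
--     def in_list(l, ans):
--         for item in l:
--             if item[0] == ans:
--                 return True
--         return False
--
--     data = {}
--     for key, items in answers.items():
--         data[key] = []
--         for ans in items:
--             if ans is not None and not in_list(data[key], ans):
--                 data[key].append([ans, 1])
--             else:
--                 for i in data[key]:
--                     if i[0] == ans:
--                         i[1] += 1
--                         break
--     return data
-- ===== SOURCE B (Python) =====
-- def data_for_view(answers):
--     data = {}
--     for key, items in answers.items():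
--         present = [x for x in items if x is not None]
--         data[key] = [[v, present.count(v)] for v in dict.fromkeys(present)]
--     return data
-- ===== Notes on version B (the rewrite author's own statement) =====
-- stated objective: simpler
-- what changed: Replaces A's incremental tally (scan the partial result for first sight, else scan again to find-and-increment) with a staged filter -> ordered dedup (dict.fromkeys) -> count-per-distinct-value (list.count) pipeline: no partial [v,c] list is ever mutated.
import Mathlib
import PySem

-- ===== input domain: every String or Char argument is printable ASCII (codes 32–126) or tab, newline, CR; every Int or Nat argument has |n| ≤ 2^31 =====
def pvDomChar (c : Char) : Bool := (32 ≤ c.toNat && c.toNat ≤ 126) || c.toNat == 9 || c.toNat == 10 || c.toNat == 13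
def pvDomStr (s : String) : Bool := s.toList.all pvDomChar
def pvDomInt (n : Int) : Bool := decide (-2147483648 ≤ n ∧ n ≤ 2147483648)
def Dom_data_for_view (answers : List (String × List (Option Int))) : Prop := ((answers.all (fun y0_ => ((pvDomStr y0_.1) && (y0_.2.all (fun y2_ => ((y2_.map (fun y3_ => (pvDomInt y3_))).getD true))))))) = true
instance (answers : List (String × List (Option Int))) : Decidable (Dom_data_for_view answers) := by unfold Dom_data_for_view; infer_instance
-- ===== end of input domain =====

-- ===== PORT A =====
-- B replaces A's incremental tally with a staged filter → ordered dedup → count-per-value pipeline (simpler; no speed claim).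
-- Python compares item[0] (an int) with ans (int or None): int == None is False.
def pvEqIntOpt (x : Int) (ans : Option Int) : Bool :=
  match ans with
  | some v => x == v
  | none => false

-- in_list(l, ans); entries are always [v, c], so item[0] is item.headD 0 (never out of range)
def pvInList (l : List (List Int)) (ans : Option Int) : Bool :=
  match l with
  | [] => false
  | item :: rest => if pvEqIntOpt (item.headD 0) ans then true else pvInList rest ans

-- the else-branch loop: find the first entry with i[0] == ans and do i[1] += 1, then break
def pvIncrFirst (l : List (List Int)) (ans : Option Int) : List (List Int) :=
  match l with
  | [] => []
  | item :: rest =>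
    if pvEqIntOpt (item.headD 0) ans then (item.set 1 (item.getD 1 0 + 1)) :: rest
    else item :: pvIncrFirst rest ans

-- the inner 'for ans in items' loop, accumulating data[key]
def pvProcItems (items : List (Option Int)) (acc : List (List Int)) : List (List Int) :=
  match items with
  | [] => acc
  | ans :: rest =>
    pvProcItems rest
      (match ans with
       | some v => if !(pvInList acc (some v)) then acc ++ [[v, 1]] else pvIncrFirst acc (some v)
       | none => pvIncrFirst acc none)

def data_for_view (answers : List (String × List (Option Int))) : List (String × List (List Int)) :=
  (answers.foldl
    (fun (d : PySem.Dict String (List (List Int))) kv => d.insert kv.1 (pvProcItems kv.2 []))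
    PySem.Dict.empty).items

-- ===== PORT B =====
-- per key: present = [x for x in items if x is not None];
--          data[key] = [[v, present.count(v)] for v in dict.fromkeys(present)]
def data_for_view_alt (answers : List (String × List (Option Int))) : List (String × List (List Int)) :=
  (answers.foldl
    (fun (d : PySem.Dict String (List (List Int))) kv =>
      let present := kv.2.filterMap (fun x => x)
      d.insert kv.1 ((PySem.List.dedup present).map (fun v => [v, (present.count v : Int)])))
    PySem.Dict.empty).items

-- ===== PRECONDITION & SPEC =====
def Spec_data_for_view (answers : List (String × List (Option Int))) (out : List (String × List (List Int))) : Prop := out = data_for_view_alt answers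
instance (answers : List (String × List (Option Int))) (out : List (String × List (List Int))) : Decidable (Spec_data_for_view answers out) := by unfold Spec_data_for_view; infer_instance

-- ===== CLAIM (what is proved, stated in full; the proofs are below) =====
def Claim_equal_data_for_view : Prop := ∀ (answers : List (String × List (Option Int))), Dom_data_for_view answers → Spec_data_for_view answers (data_for_view answers)

-- ===== LEMMAS AND PROOFS =====

-- proof-side helper: A's per-key tally, viewed as an insert-counting dict fold
def pvCounts (items : List (Option Int)) : PySem.Dict Int Int :=
  items.foldl
    (fun c x =>
      match x with
      | some v => c.insert v (c.getD v 0 + 1)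
      | none => c)
    PySem.Dict.empty

lemma pvIncrFirst_none (l : List (List Int)) : pvIncrFirst l none = l := by
  induction l with
  | nil => rfl
  | cons item rest ih => simp [pvIncrFirst, pvEqIntOpt, ih]

lemma pvInList_map (l : List (Int × Int)) (v : Int) :
    pvInList (l.map (fun p => [p.1, p.2])) (some v) = l.any (fun p => p.1 == v) := by
  induction l with
  | nil => rfl
  | cons p rest ih =>
    by_cases h : p.1 = v <;> simp [pvInList, pvEqIntOpt, h, ih]

lemma pvInList_contains (c : PySem.Dict Int Int) (v : Int) :
    pvInList (c.items.map (fun p => [p.1, p.2])) (some v) = c.contains v := by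
  rw [pvInList_map, PySem.Dict.contains_eq_decide_mem_keys]
  apply Bool.eq_iff_iff.mpr
  simp only [List.any_eq_true, decide_eq_true_eq, PySem.Dict.keys, List.mem_map, beq_iff_eq]

lemma pvIncrFirst_map (l : List (Int × Int)) (v : Int) (w : Int)
    (hnd : (l.map (·.1)).Nodup) (hmem : (v, w) ∈ l) :
    pvIncrFirst (l.map (fun p => [p.1, p.2])) (some v) =
      (l.map (fun p => if p.1 == v then (v, w + 1) else p)).map (fun p => [p.1, p.2]) := by
  induction l with
  | nil => simp at hmem
  | cons p rest ih =>
    simp only [List.map_cons, List.nodup_cons, List.mem_map] at hnd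
    by_cases h : p.1 = v
    · have hp2 : p = (v, w) := by
        rcases List.mem_cons.mp hmem with h1 | h1
        · exact h1.symm
        · exact absurd ⟨(v, w), h1, h.symm⟩ hnd.1
      subst hp2
      have hrest : ∀ q ∈ rest, (if (q.1 == v) = true then ((v, w + 1) : Int × Int) else q) = id q := by
        intro q hq
        have hne : ¬ ((q.1 == v) = true) := by
          simp only [beq_iff_eq]
          exact fun hqv => hnd.1 ⟨q, hq, hqv⟩
        rw [if_neg hne]
        rfl
      have hmapr : List.map (fun q => if (q.1 == v) = true then ((v, w + 1) : Int × Int) else q) rest = rest := by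
        rw [List.map_congr_left hrest, List.map_id]
      simp only [List.map_cons]
      rw [hmapr]
      simp [pvIncrFirst, pvEqIntOpt]
    · have hmem' : (v, w) ∈ rest := by
        rcases List.mem_cons.mp hmem with h1 | h1
        · exact absurd (by rw [← h1]) h
        · exact h1
      have hne : (p.1 == v) = false := beq_eq_false_iff_ne.mpr h
      simp only [List.map_cons, pvIncrFirst, pvEqIntOpt, List.headD_cons, hne,
        Bool.false_eq_true, if_false]
      rw [ih hnd.2 hmem']

lemma pvProcItems_counts (items : List (Option Int)) (c : PySem.Dict Int Int)
    (hnd : c.keys.Nodup) :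
    pvProcItems items (c.items.map (fun p => [p.1, p.2])) =
      (items.foldl
        (fun c x =>
          match x with
          | some v => c.insert v (c.getD v 0 + 1)
          | none => c) c).items.map (fun p => [p.1, p.2]) := by
  induction items generalizing c with
  | nil => rfl
  | cons x rest ih =>
    match x with
    | none =>
      simp only [pvProcItems, List.foldl_cons, pvIncrFirst_none]
      exact ih c hnd
    | some v =>
      simp only [pvProcItems, List.foldl_cons, pvInList_contains]
      by_cases hc : c.contains v = true
      · have hsome : (c.get? v).isSome := by
          rw [← PySem.Dict.contains_eq_isSome_get? c v]; exact hc
        rcases Option.isSome_iff_exists.mp hsome with ⟨w, hw⟩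
        have hgetD : c.getD v 0 = w := by
          rw [PySem.Dict.getD_eq_get?_getD c v 0, hw]; rfl
        have hmem : (v, w) ∈ c.items := PySem.Dict.mem_items_of_get?_eq_some c hw
        rw [hc]
        simp only [Bool.not_true, Bool.false_eq_true, if_false]
        rw [pvIncrFirst_map c.items v w hnd hmem, hgetD,
          ← PySem.Dict.items_insert_of_contains c (w + 1) hc]
        exact ih _ (PySem.Dict.nodup_keys_insert c v (w + 1) hnd)
      · have hc' : c.contains v = false := by simpa using hc
        rw [hc']
        simp only [Bool.not_false, if_true]
        rw [PySem.Dict.getD_of_not_contains c 0 hc']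
        rw [show ([[v, (1:Int)]] : List (List Int)) =
          List.map (fun p : Int × Int => [p.1, p.2]) [(v, 1)] from rfl, ← List.map_append]
        rw [show (c.items ++ [((v : Int), (1 : Int))]) = (c.insert v (0 + 1)).items by
          rw [PySem.Dict.items_insert_of_not_contains c (0 + 1) hc']; norm_num]
        exact ih _ (PySem.Dict.nodup_keys_insert c v (0 + 1) hnd)

-- A's skip-None insert fold equals the insert fold over the filtered list, i.e. Counter(present)
lemma pvCounts_eq_counter (items : List (Option Int)) :
    pvCounts items = PySem.Dict.counter (items.filterMap (fun x => x)) := by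
  rw [← PySem.Dict.foldl_insert_getD_add_one_eq_counter]
  unfold pvCounts
  generalize PySem.Dict.empty = c
  induction items generalizing c with
  | nil => rfl
  | cons x rest ih =>
    match x with
    | none => simpa [List.filterMap_cons] using ih c
    | some v => simpa [List.filterMap_cons] using ih (c.insert v (c.getD v 0 + 1))

lemma pvPerKey (items : List (Option Int)) :
    pvProcItems items [] =
      (PySem.List.dedup (items.filterMap (fun x => x))).map
        (fun v => [v, ((items.filterMap (fun x => x)).count v : Int)]) := by
  have h := pvProcItems_counts items PySem.Dict.empty PySem.Dict.nodup_keys_empty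
  have h2 : pvProcItems items [] = (pvCounts items).items.map (fun p => [p.1, p.2]) := by
    simpa [pvCounts] using h
  rw [h2, pvCounts_eq_counter, PySem.Dict.items_counter, List.map_map,
    PySem.List.dedup_eq_ofList]
  rfl

-- ===== VERDICT (by name: the statement is the Claim_ definition above) =====
theorem data_for_view_spec : Claim_equal_data_for_view := by
  intro answers _
  unfold Spec_data_for_view data_for_view data_for_view_alt
  have hf : (fun (d : PySem.Dict String (List (List Int))) (kv : String × List (Option Int)) =>
        d.insert kv.1 (pvProcItems kv.2 [])) =
      (fun (d : PySem.Dict String (List (List Int))) (kv : String × List (Option Int)) =>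
        let present := kv.2.filterMap (fun x => x)
        d.insert kv.1 ((PySem.List.dedup present).map (fun v => [v, (present.count v : Int)]))) := by
    funext d kv
    rw [pvPerKey]
  rw [hf]
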